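-- pv_equiv track=rewrite | github.com/MularX/sentinel_control | sentinel_control/path_planner_single.py | _simplify_to_corners
-- ===== SOURCE A (Python) =====
-- def _simplify_to_corners(path_cells):
--     if len(path_cells) <= 2: return path_cells[:]
--     out = [path_cells[0]]
--     prev, curr = path_cells[0], path_cells[1]
--     def normalize(d): dx,dy=d; return (0 if dx==0 else int(dx/abs(dx)), 0 if dy==0 else int(dy/abs(dy)))
--     prev_dir = (curr[0]-prev[0], curr[1]-prev[1])
--     for i in range(2, len(path_cells)):
--         next_punkt = path_cells[i]
--         cur_dir = (next_punkt[0]-curr[0], next_punkt[1]-curr[1])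
--         if normalize(cur_dir) != normalize(prev_dir): out.append(curr)
--         prev, curr, prev_dir = curr, next_punkt, cur_dir
--     out.append(path_cells[-1]); return out
-- ===== SOURCE B (Python) =====
-- def _simplify_to_corners(path_cells):
--     if len(path_cells) <= 2:
--         return path_cells[:]
--     def sign(v):
--         return (v > 0) - (v < 0)
--     def direction(k):
--         p, q = path_cells[k], path_cells[k + 1]
--         return (sign(q[0] - p[0]), sign(q[1] - p[1]))
--     n = len(path_cells)
--     out = [path_cells[0]]
--     i = 0
--     while i + 1 < n:
--         d = direction(i)
--         j = i + 1
--         while j + 1 < n and direction(j) == d: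
--             j += 1
--         out.append(path_cells[j])
--         i = j
--     return out
-- ===== Notes on version B (the rewrite author's own statement) =====
-- stated objective: alternative
-- what changed: Replaces A's per-element keep/skip scan with running prev/curr/prev_dir state by a two-pointer run-skipping loop: an inner pointer jumps to the end of each maximal run of equal step directions and only that run endpoint is emitted, so the final point falls out as the last run's end and there is no separate direction-change branch or final append.
import Mathlib
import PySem

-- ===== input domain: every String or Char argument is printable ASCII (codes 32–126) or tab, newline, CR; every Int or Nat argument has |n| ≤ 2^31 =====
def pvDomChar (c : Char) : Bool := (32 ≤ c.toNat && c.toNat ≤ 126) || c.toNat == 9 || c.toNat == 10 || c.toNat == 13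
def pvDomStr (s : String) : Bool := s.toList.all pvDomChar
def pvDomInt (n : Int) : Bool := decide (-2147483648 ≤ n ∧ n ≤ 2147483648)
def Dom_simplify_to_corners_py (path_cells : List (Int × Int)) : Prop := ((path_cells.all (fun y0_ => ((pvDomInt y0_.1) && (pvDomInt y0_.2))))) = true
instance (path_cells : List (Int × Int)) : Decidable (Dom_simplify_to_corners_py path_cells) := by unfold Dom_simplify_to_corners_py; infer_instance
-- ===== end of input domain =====

-- B replaces A's per-element keep/skip scan with running prev/curr/prev_dir state by a
-- two-pointer run-skipping loop that jumps to the end of each maximal equal-direction run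
-- and emits only run endpoints (objective: alternative, same O(n) cost).

-- ===== PORT A =====
-- normalize(d): (0 if dx==0 else int(dx/abs(dx)), 0 if dy==0 else int(dy/abs(dy)))
def pvNormA (d : Int × Int) : Int × Int :=
  (if d.1 = 0 then 0 else d.1 / |d.1|, if d.2 = 0 then 0 else d.2 / |d.2|)

-- the for-loop of A as structural recursion over the remaining cells, state (out, prev, curr, prev_dir)
def pvLoopA (st : List (Int × Int) × (Int × Int) × (Int × Int) × (Int × Int)) :
    List (Int × Int) → List (Int × Int) × (Int × Int) × (Int × Int) × (Int × Int)
  | [] => st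
  | next_punkt :: rest =>
    let (out, _prev, curr, prev_dir) := st
    let cur_dir := (next_punkt.1 - curr.1, next_punkt.2 - curr.2)
    let out := if pvNormA cur_dir ≠ pvNormA prev_dir then out ++ [curr] else out
    pvLoopA (out, curr, next_punkt, cur_dir) rest

def simplify_to_corners_py (path_cells : List (Int × Int)) : List (Int × Int) :=
  if path_cells.length ≤ 2 then path_cells
  else
    match path_cells with
    | p0 :: p1 :: rest =>
      -- the loop over range(2, len) reads path_cells[i]; recurse over those same elements
      let st := pvLoopA ([p0], p0, p1, (p1.1 - p0.1, p1.2 - p0.2)) rest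
      st.1 ++ [(p0 :: p1 :: rest).getLast (by simp)]   -- out.append(path_cells[-1])
    | _ => path_cells

-- ===== PORT B =====
-- sign(v) = (v > 0) - (v < 0)
def pvSign (v : Int) : Int := (if v > 0 then 1 else 0) - (if v < 0 then 1 else 0)

-- direction(k): normalized step from path_cells[k] to path_cells[k+1] (always called in range)
def pvDirB (c : List (Int × Int)) (k : Nat) : Int × Int :=
  let p := c.getD k (0, 0)
  let q := c.getD (k + 1) (0, 0)
  (pvSign (q.1 - p.1), pvSign (q.2 - p.2))

-- inner while loop: advance j while j+1 < n and direction(j) == d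
def pvInner (c : List (Int × Int)) (n : Nat) (d : Int × Int) (k : Nat) : Nat :=
  if h : k + 1 < n ∧ pvDirB c k = d then pvInner c n d (k + 1) else k
termination_by n - k
decreasing_by omega

-- the inner pointer never moves backwards (needed for the outer loop's termination)
theorem pvInner_ge (c : List (Int × Int)) (n : Nat) (d : Int × Int) (k : Nat) :
    k ≤ pvInner c n d k := by
  rw [pvInner]
  by_cases h : k + 1 < n ∧ pvDirB c k = d
  · rw [dif_pos h]
    exact Nat.le_trans (Nat.le_succ k) (pvInner_ge c n d (k + 1))
  · rw [dif_neg h]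
termination_by n - k
decreasing_by omega

-- outer while loop: emit the endpoint of each maximal run of equal directions
def pvOuter (c : List (Int × Int)) (n : Nat) (i : Nat) (out : List (Int × Int)) :
    List (Int × Int) :=
  if _h : i + 1 < n then
    pvOuter c n (pvInner c n (pvDirB c i) (i + 1))
      (out ++ [c.getD (pvInner c n (pvDirB c i) (i + 1)) (0, 0)])
  else out
termination_by n - i
decreasing_by
  have := pvInner_ge c n (pvDirB c i) (i + 1)
  omega

def simplify_to_corners_py_alt (path_cells : List (Int × Int)) : List (Int × Int) :=
  if path_cells.length ≤ 2 then path_cells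
  else pvOuter path_cells path_cells.length 0 [path_cells.getD 0 (0, 0)]

-- ===== PRECONDITION & SPEC =====
def Spec_simplify_to_corners_py (path_cells : List (Int × Int)) (out : List (Int × Int)) : Prop := out = simplify_to_corners_py_alt path_cells
instance (path_cells : List (Int × Int)) (out : List (Int × Int)) : Decidable (Spec_simplify_to_corners_py path_cells out) := by unfold Spec_simplify_to_corners_py; infer_instance

-- ===== CLAIM (what is proved, stated in full; the proofs are below) =====
def Claim_equal_simplify_to_corners_py : Prop := ∀ (path_cells : List (Int × Int)), Dom_simplify_to_corners_py path_cells → Spec_simplify_to_corners_py path_cells (simplify_to_corners_py path_cells)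

-- ===== LEMMAS AND PROOFS =====

-- A's interior scan: nd is the incoming direction, curr the current cell
def pvScan (nd : Int × Int) (curr : Int × Int) : List (Int × Int) → List (Int × Int)
  | [] => []
  | n :: t =>
    let cd := (pvSign (n.1 - curr.1), pvSign (n.2 - curr.2))
    (if cd ≠ nd then [curr] else []) ++ pvScan cd n t

-- common reference: emit curr on direction change AND emit the last cell
def pvEmit (nd : Int × Int) (curr : Int × Int) : List (Int × Int) → List (Int × Int)
  | [] => [curr]
  | n :: t =>
    let cd := (pvSign (n.1 - curr.1), pvSign (n.2 - curr.2))
    (if cd ≠ nd then [curr] else []) ++ pvEmit cd n t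

theorem pvNormA_eq_sign (d : Int × Int) : pvNormA d = (pvSign d.1, pvSign d.2) := by
  obtain ⟨x, y⟩ := d
  simp only [pvNormA, pvSign, Prod.mk.injEq]
  refine ⟨?_, ?_⟩
  · rcases lt_trichotomy x 0 with h | h | h
    · simp [h.ne, abs_of_neg h, Int.ediv_neg, h, not_lt.2 h.le]
    · simp [h]
    · simp [h.ne', abs_of_pos h, h, not_lt.2 h.le]
  · rcases lt_trichotomy y 0 with h | h | h
    · simp [h.ne, abs_of_neg h, Int.ediv_neg, h, not_lt.2 h.le]
    · simp [h]
    · simp [h.ne', abs_of_pos h, h, not_lt.2 h.le]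

theorem pvLoopA_eq_scan (t : List (Int × Int)) :
    ∀ (acc : List (Int × Int)) (prev curr pd : Int × Int),
    (pvLoopA (acc, prev, curr, pd) t).1 = acc ++ pvScan (pvSign pd.1, pvSign pd.2) curr t := by
  induction t with
  | nil => intro acc prev curr pd; simp [pvLoopA, pvScan]
  | cons n t ih =>
    intro acc prev curr pd
    simp only [pvLoopA, pvScan]
    rw [ih, pvNormA_eq_sign, pvNormA_eq_sign]
    by_cases h : (pvSign (n.1 - curr.1), pvSign (n.2 - curr.2)) = (pvSign pd.1, pvSign pd.2) <;>
      simp [h]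

theorem pvScan_last (t : List (Int × Int)) :
    ∀ (nd curr : Int × Int), pvScan nd curr t ++ [t.getLastD curr] = pvEmit nd curr t := by
  induction t with
  | nil => intro nd curr; simp [pvScan, pvEmit]
  | cons n t ih =>
    intro nd curr
    simp only [pvScan, pvEmit, List.getLastD_cons, List.append_assoc]
    rw [ih]

theorem pvOuter_eq_emit (c : List (Int × Int)) :
    ∀ (m i : Nat) (out : List (Int × Int)), c.length - i ≤ m → i + 1 < c.length →
    pvOuter c c.length i out
      = out ++ pvEmit (pvDirB c i) (c.getD (i + 1) (0, 0)) (c.drop (i + 2)) := by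
  intro m
  induction m with
  | zero => intro i out hm hi; omega
  | succ m ih =>
    intro i out hm hi
    rw [pvOuter, dif_pos hi]
    by_cases h2 : i + 2 < c.length
    · have hdrop : c.drop (i + 2) = c.getD (i + 2) (0, 0) :: c.drop (i + 3) := by
        rw [List.getD_eq_getElem _ _ h2]; exact List.drop_eq_getElem_cons h2
      have hcd : (pvSign ((c.getD (i + 2) (0, 0)).1 - (c.getD (i + 1) (0, 0)).1),
                  pvSign ((c.getD (i + 2) (0, 0)).2 - (c.getD (i + 1) (0, 0)).2))
          = pvDirB c (i + 1) := rfl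
      by_cases hd : pvDirB c (i + 1) = pvDirB c i
      · -- same direction: the inner pointer advances; outer at i behaves like outer at i+1
        have hinner : pvInner c c.length (pvDirB c i) (i + 1)
            = pvInner c c.length (pvDirB c (i + 1)) (i + 2) := by
          rw [pvInner, dif_pos ⟨h2, hd⟩, hd]
        have hih := ih (i + 1) out (by omega) (by omega)
        rw [pvOuter, dif_pos (show i + 1 + 1 < c.length by omega)] at hih
        rw [show i + 1 + 1 = i + 2 from rfl, show i + 1 + 2 = i + 3 from rfl] at hih
        rw [hinner, hih, hdrop]
        simp only [pvEmit, hcd, hd, ne_eq, not_true_eq_false, if_false, List.nil_append]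
      · -- direction changes at i+1: the run ends there
        have hinner : pvInner c c.length (pvDirB c i) (i + 1) = i + 1 := by
          rw [pvInner, dif_neg (by tauto)]
        have hih := ih (i + 1) (out ++ [c.getD (i + 1) (0, 0)]) (by omega) (by omega)
        rw [show i + 1 + 1 = i + 2 from rfl, show i + 1 + 2 = i + 3 from rfl] at hih
        rw [hinner, hih, hdrop]
        simp only [pvEmit, hcd, ne_eq, hd, not_false_eq_true, if_true, List.append_assoc,
          List.singleton_append]
    · -- i+1 is the last index: the run (and the path) ends at i+1
      have hdrop : c.drop (i + 2) = [] := List.drop_eq_nil_of_le (by omega)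
      have hinner : pvInner c c.length (pvDirB c i) (i + 1) = i + 1 := by
        rw [pvInner, dif_neg (fun hh => h2 hh.1)]
      rw [hinner, pvOuter, dif_neg (show ¬ i + 1 + 1 < c.length by omega), hdrop]
      simp [pvEmit]

-- ===== VERDICT (by name: the statement is the Claim_ definition above) =====
theorem simplify_to_corners_py_spec : Claim_equal_simplify_to_corners_py := by
  intro path _dom
  unfold Spec_simplify_to_corners_py simplify_to_corners_py simplify_to_corners_py_alt
  by_cases hlen : path.length ≤ 2
  · simp [hlen]
  · match path, hlen with
    | [], hlen => simp at hlen
    | [_], hlen => simp at hlen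
    | [_, _], hlen => simp at hlen
    | p0 :: p1 :: rest, hlen =>
      simp only [if_neg hlen]
      have hlen' : 0 + 1 < (p0 :: p1 :: rest).length := by simp
      rw [pvOuter_eq_emit (p0 :: p1 :: rest) ((p0 :: p1 :: rest).length) 0 _ le_rfl hlen']
      rw [pvLoopA_eq_scan]
      have hlast : (p0 :: p1 :: rest).getLast (by simp) = rest.getLastD p1 := by
        simp [List.getLast_eq_getLastD]
      rw [hlast, List.append_assoc, pvScan_last]
      simp [pvDirB]
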